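-- pv_equiv track=rewrite | github.com/0verLighT/2025-NSI | 36/25-NSI-36.py | nombre_de_mots
-- ===== SOURCE A (Python) =====
-- def nombre_de_mots(texte):
--     acc = 0
--     for i in texte.split(' '):
--         if i == "?" or i == "!":
--             continue
--         else:
--             acc = acc + 1
--     return acc
-- ===== SOURCE B (Python) =====
-- def nombre_de_mots(texte):
--     tokens = texte.split(' ')
--     return len(tokens) - tokens.count('?') - tokens.count('!')
-- ===== Notes on version B (the rewrite author's own statement) =====
-- stated objective: idiomatic
-- what changed: Replaces the explicit loop with a per-token skip branch by one arithmetic expression: total token count minus the counts of the '?' and '!' sentinel tokens.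
import Mathlib
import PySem

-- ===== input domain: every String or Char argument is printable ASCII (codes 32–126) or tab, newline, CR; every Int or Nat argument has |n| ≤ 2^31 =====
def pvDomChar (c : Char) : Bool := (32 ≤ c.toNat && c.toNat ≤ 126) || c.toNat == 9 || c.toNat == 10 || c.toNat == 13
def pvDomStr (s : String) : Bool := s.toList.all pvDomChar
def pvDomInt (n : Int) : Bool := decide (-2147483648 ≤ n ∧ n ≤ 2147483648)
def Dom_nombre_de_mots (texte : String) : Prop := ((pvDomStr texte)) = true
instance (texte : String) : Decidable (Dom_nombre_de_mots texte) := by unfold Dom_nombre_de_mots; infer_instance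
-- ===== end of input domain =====

-- B computes the word count arithmetically as total tokens minus '?' and '!' token counts, instead of A's filtering loop.


-- ===== PORT A =====
def nombre_de_mots (texte : String) : Int :=
  ((PySem.Str.split? texte " ").getD []).foldl
    (fun acc i => if i == "?" || i == "!" then acc else acc + 1) 0

-- ===== PORT B =====
def nombre_de_mots_alt (texte : String) : Int :=
  let tokens := (PySem.Str.split? texte " ").getD []
  (tokens.length : Int) - (tokens.count "?" : Int) - (tokens.count "!" : Int)

-- ===== PRECONDITION & SPEC =====
def Spec_nombre_de_mots (texte : String) (out : Int) : Prop := out = nombre_de_mots_alt texte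
instance (texte : String) (out : Int) : Decidable (Spec_nombre_de_mots texte out) := by unfold Spec_nombre_de_mots; infer_instance

-- ===== CLAIM (what is proved, stated in full; the proofs are below) =====
def Claim_equal_nombre_de_mots : Prop := ∀ (texte : String), Dom_nombre_de_mots texte → Spec_nombre_de_mots texte (nombre_de_mots texte)

-- ===== LEMMAS AND PROOFS =====
theorem nombre_de_mots_foldl (l : List String) (a : Int) :
    l.foldl (fun acc i => if i == "?" || i == "!" then acc else acc + 1) a
      = a + (l.length : Int) - (l.count "?" : Int) - (l.count "!" : Int) := by
  induction l generalizing a with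
  | nil => simp
  | cons x xs ih =>
    simp only [List.foldl_cons, ih, List.length_cons, List.count_cons]
    by_cases h? : x = "?"
    · subst h?; simp
      push_cast
      ring
    · by_cases h! : x = "!"
      · subst h!; simp
        push_cast
        ring
      · have : (x == "?" || x == "!") = false := by
          simp [h?, h!]
        simp [this, h?, h!]
        push_cast
        ring

-- ===== VERDICT (by name: the statement is the Claim_ definition above) =====
theorem nombre_de_mots_spec : Claim_equal_nombre_de_mots := by
  intro texte _
  unfold Spec_nombre_de_mots nombre_de_mots nombre_de_mots_alt
  rw [nombre_de_mots_foldl]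
  ring
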